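-- pv_equiv track=rewrite | github.com/chechere10/Ramirez | backend/app/services/pdf_highlighter.py | _insertar_separadores
-- ===== SOURCE A (Python) =====
-- def _insertar_separadores(codigo: str, separador: str) -> str:
--     """Inserta separadores en transiciones letra-número."""
--     if not codigo:
--         return codigo
--
--     resultado = [codigo[0]]
--     for i in range(1, len(codigo)):
--         char_actual = codigo[i]
--         char_anterior = codigo[i - 1]
--
--         if (char_anterior.isalpha() and char_actual.isdigit()) or \
--            (char_anterior.isdigit() and char_actual.isalpha()):
--             resultado.append(separador)
--
--         resultado.append(char_actual)
--
--     return "".join(resultado)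
-- ===== SOURCE B (Python) =====
-- def _insertar_separadores(codigo: str, separador: str) -> str:
--     """Run-based rewrite: split codigo into maximal runs of one character
--     class (alpha / digit / other), then concatenate the runs, inserting
--     separador between an alpha run and a digit run (either order)."""
--     def clave(ch):
--         if ch.isalpha():
--             return 'a'
--         if ch.isdigit():
--             return 'd'
--         return 'o'
--
--     runs = []
--     i = 0
--     n = len(codigo)
--     while i < n:
--         k = clave(codigo[i])
--         j = i + 1
--         while j < n and clave(codigo[j]) == k:
--             j += 1
--         runs.append((k, codigo[i:j]))
--         i = j
--
--     piezas = []
--     prev = None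
--     for k, texto in runs:
--         if (prev == 'a' and k == 'd') or (prev == 'd' and k == 'a'):
--             piezas.append(separador)
--         piezas.append(texto)
--         prev = k
--     return ''.join(piezas)
-- ===== Notes on version B (the rewrite author's own statement) =====
-- stated objective: alternative
-- what changed: Replaces A's per-character scan comparing each char with its predecessor by a two-phase run decomposition: split the string into maximal runs of one character class (alpha/digit/other) with a two-pointer scan, then join the runs inserting the separator between adjacent alpha and digit runs.
import Mathlib
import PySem

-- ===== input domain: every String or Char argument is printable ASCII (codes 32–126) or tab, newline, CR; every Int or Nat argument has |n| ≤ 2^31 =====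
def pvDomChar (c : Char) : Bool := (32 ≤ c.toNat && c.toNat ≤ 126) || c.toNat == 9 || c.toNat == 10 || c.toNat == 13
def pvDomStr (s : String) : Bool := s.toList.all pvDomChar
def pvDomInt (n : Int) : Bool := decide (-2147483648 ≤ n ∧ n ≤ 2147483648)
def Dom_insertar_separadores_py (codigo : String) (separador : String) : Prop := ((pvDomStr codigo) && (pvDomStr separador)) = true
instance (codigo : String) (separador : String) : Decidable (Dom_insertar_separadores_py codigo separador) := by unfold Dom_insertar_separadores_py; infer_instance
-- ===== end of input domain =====

-- B replaces A's char-by-char predecessor comparison with a run decomposition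
-- (maximal alpha/digit/other runs, separator inserted between adjacent alpha
-- and digit runs); same cost, different decomposition; return values proved equal.


-- ===== PORT A =====
-- the if-condition of A's loop body
def pvCrossA (p c : Char) : Bool :=
  (PySem.Chars.isalpha p && PySem.Chars.isdigit c) || (PySem.Chars.isdigit p && PySem.Chars.isalpha c)

-- A's 'for i in range(1, len(codigo))' loop: prev = codigo[i-1], c = codigo[i];
-- 'resultado' (a list of strings later joined by "") is built here directly as
-- the flattened char list — exact, since "".join just concatenates.
def pvLoopA (sep : List Char) (prev : Char) : List Char → List Char
  | [] => []
  | c :: cs => (if pvCrossA prev c then sep else []) ++ c :: pvLoopA sep c cs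

def insertar_separadores_py (codigo : String) (separador : String) : String :=
  match codigo.toList with
  | [] => codigo                       -- 'if not codigo: return codigo'
  | c :: cs => String.ofList (c :: pvLoopA separador.toList c cs)

-- ===== PORT B =====
-- Source B's clave(ch)
def pvClave (c : Char) : Char :=
  if PySem.Chars.isalpha c then 'a' else if PySem.Chars.isdigit c then 'd' else 'o'

-- Source B's first while loop: two-pointer split into maximal equal-clave runs
-- (the inner 'while j < n and clave(codigo[j]) == k' is the takeWhile/dropWhile).
def pvRuns : List Char → List (Char × List Char)
  | [] => []
  | c :: cs =>
      (pvClave c, c :: cs.takeWhile (fun x => pvClave x == pvClave c))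
        :: pvRuns (cs.dropWhile (fun x => pvClave x == pvClave c))
termination_by l => l.length
decreasing_by
  have := List.length_dropWhile_le (fun x => pvClave x == pvClave c) cs
  simp; omega

-- Source B's second loop: emit runs, inserting separador on an alpha/digit boundary
def pvEmit (sep : List Char) : Option Char → List (Char × List Char) → List Char
  | _, [] => []
  | prev, (k, run) :: rest =>
      (if (prev == some 'a' && k == 'd') || (prev == some 'd' && k == 'a') then sep else [])
        ++ run ++ pvEmit sep (some k) rest

def insertar_separadores_py_alt (codigo : String) (separador : String) : String :=
  String.ofList (pvEmit separador.toList none (pvRuns codigo.toList))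

-- ===== PRECONDITION & SPEC =====
def Spec_insertar_separadores_py (codigo : String) (separador : String) (out : String) : Prop := out = insertar_separadores_py_alt codigo separador
instance (codigo : String) (separador : String) (out : String) : Decidable (Spec_insertar_separadores_py codigo separador out) := by unfold Spec_insertar_separadores_py; infer_instance

-- ===== CLAIM (what is proved, stated in full; the proofs are below) =====
def Claim_equal_insertar_separadores_py : Prop := ∀ (codigo : String) (separador : String), Dom_insertar_separadores_py codigo separador → Spec_insertar_separadores_py codigo separador (insertar_separadores_py codigo separador)

-- ===== LEMMAS AND PROOFS =====

-- PySem's isalpha and isdigit are disjoint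
theorem pv_not_alpha_digit (c : Char) (h : PySem.Chars.isalpha c = true) :
    PySem.Chars.isdigit c = false := by
  simp only [PySem.Chars.isalpha, PySem.Chars.isupper, PySem.Chars.islower,
    Bool.or_eq_true, Bool.and_eq_true, decide_eq_true_eq] at h
  simp only [PySem.Chars.isdigit, Bool.and_eq_false_iff, decide_eq_false_iff_not]
  rcases h with ⟨h1, h2⟩ | ⟨h1, h2⟩
  · exact Or.inr fun h9 => absurd (h1.trans h9) (by decide)
  · exact Or.inr fun h9 => absurd (h1.trans h9) (by decide)

-- A's transition test, expressed through B's key function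
theorem pv_cross_eq (p c : Char) :
    pvCrossA p c = ((pvClave p == 'a' && pvClave c == 'd') || (pvClave p == 'd' && pvClave c == 'a')) := by
  unfold pvCrossA pvClave
  cases hap : PySem.Chars.isalpha p with
  | true =>
      have hdp := pv_not_alpha_digit p hap
      cases hac : PySem.Chars.isalpha c with
      | true =>
          have hdc := pv_not_alpha_digit c hac
          simp [hdp, hdc]
      | false =>
          simp [hdp]
          cases PySem.Chars.isdigit c <;> simp
  | false =>
      cases hac : PySem.Chars.isalpha c with
      | true =>
          have hdc := pv_not_alpha_digit c hac
          simp [hdc]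
          cases PySem.Chars.isdigit p <;> simp
      | false =>
          simp
          cases PySem.Chars.isdigit p <;> cases PySem.Chars.isdigit c <;> simp

theorem pv_cross_false_of_eq (p c : Char) (h : pvClave p = pvClave c) : pvCrossA p c = false := by
  rw [pv_cross_eq, h]
  cases hc : pvClave c == 'a' <;> cases hd : pvClave c == 'd' <;> simp_all

-- A's loop walks straight through a run of equal keys
theorem pv_loop_run (sep : List Char) (t rest : List Char) (p : Char)
    (h : ∀ x ∈ t, pvClave x = pvClave p) :
    ∃ q, pvClave q = pvClave p ∧ pvLoopA sep p (t ++ rest) = t ++ pvLoopA sep q rest := by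
  induction t generalizing p with
  | nil => exact ⟨p, rfl, rfl⟩
  | cons x t ih =>
      have hx : pvClave x = pvClave p := h x (by simp)
      obtain ⟨q, hq, he⟩ := ih x (fun y hy => (h y (List.mem_cons_of_mem _ hy)).trans hx.symm)
      refine ⟨q, hq.trans hx, ?_⟩
      simp [pvLoopA, pv_cross_false_of_eq p x hx.symm, he]

-- main correspondence: A's loop = B's emit over B's runs
theorem pv_loop_eq_emit (sep : List Char) :
    ∀ (n : Nat) (l : List Char), l.length ≤ n → ∀ p : Char,
      pvLoopA sep p l = pvEmit sep (some (pvClave p)) (pvRuns l) := by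
  intro n
  induction n with
  | zero =>
      intro l hl p
      have : l = [] := List.length_eq_zero_iff.mp (Nat.le_zero.mp hl)
      subst this
      simp [pvLoopA, pvRuns, pvEmit]
  | succ n ih =>
      intro l hl p
      match l with
      | [] => simp [pvLoopA, pvRuns, pvEmit]
      | c :: cs =>
          have hsplit : cs.takeWhile (fun x => pvClave x == pvClave c)
              ++ cs.dropWhile (fun x => pvClave x == pvClave c) = cs := List.takeWhile_append_dropWhile
          have htw : ∀ x ∈ cs.takeWhile (fun x => pvClave x == pvClave c), pvClave x = pvClave c := by
            intro x hx
            have := List.mem_takeWhile_imp hx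
            simpa using this
          obtain ⟨q, hq, he⟩ := pv_loop_run sep (cs.takeWhile (fun x => pvClave x == pvClave c))
            (cs.dropWhile (fun x => pvClave x == pvClave c)) c htw
          have hlen : (cs.dropWhile (fun x => pvClave x == pvClave c)).length ≤ n := by
            have h1 := List.length_dropWhile_le (fun x => pvClave x == pvClave c) cs
            simp at hl; omega
          have hrec := ih (cs.dropWhile (fun x => pvClave x == pvClave c)) hlen q
          simp only [pvRuns, pvEmit, pvLoopA]
          rw [← hsplit]
          rw [he, hrec, hq, pv_cross_eq]
          simp

theorem pv_emit_head (sep : List Char) (k : Char) (run : List Char) (rest : List (Char × List Char)) :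
    pvEmit sep none ((k, run) :: rest) = run ++ pvEmit sep (some k) rest := by
  simp [pvEmit]

-- ===== VERDICT (by name: the statement is the Claim_ definition above) =====
theorem insertar_separadores_py_spec : Claim_equal_insertar_separadores_py := by
  intro codigo separador _
  unfold Spec_insertar_separadores_py insertar_separadores_py insertar_separadores_py_alt
  cases hl : codigo.toList with
  | nil =>
      have hc : codigo = "" := String.toList_eq_nil_iff.mp hl
      simp only [pvRuns, pvEmit, hc, String.ofList_nil]
  | cons c cs =>
      simp only [pvRuns]
      rw [pv_emit_head]
      have hsplit : cs.takeWhile (fun x => pvClave x == pvClave c)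
          ++ cs.dropWhile (fun x => pvClave x == pvClave c) = cs := List.takeWhile_append_dropWhile
      have htw : ∀ x ∈ cs.takeWhile (fun x => pvClave x == pvClave c), pvClave x = pvClave c := by
        intro x hx
        have := List.mem_takeWhile_imp hx
        simpa using this
      obtain ⟨q, hq, he⟩ := pv_loop_run separador.toList (cs.takeWhile (fun x => pvClave x == pvClave c))
        (cs.dropWhile (fun x => pvClave x == pvClave c)) c htw
      have hrec := pv_loop_eq_emit separador.toList
        (cs.dropWhile (fun x => pvClave x == pvClave c)).length
        (cs.dropWhile (fun x => pvClave x == pvClave c)) le_rfl q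
      congr 1
      conv_lhs => rw [← hsplit]
      rw [he, hrec, hq]
      simp
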